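-- pv_equiv track=rewrite | github.com/mmshihov/informatics | lections/presentation/08-div/py/division-model.py | Divide1
-- ===== SOURCE A (Python) =====
-- N = 8
--
-- def Divide1(dividend, divider):
--     dividend    = dividend & ((1 << N) - 1)
--     divider     = divider  & ((1 << N) - 1)
--     divider     = divider << N
--
--     quotent     = 0;
--     reminder    = dividend
--     i           = 0
--
--     while (i < N):
--         i = i + 1
--
--         quotent  = (quotent  << 1)
--         reminder = (reminder << 1)
--
--         if ((reminder - divider) >= 0):
--             quotent = (quotent | 1)
--             reminder = reminder - divider
--
--     return (quotent, reminder >> N)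
-- ===== SOURCE B (Python) =====
-- N = 8
--
-- def Divide1(dividend, divider):
--     # Closed form: restoring division of 8-bit operands is just divmod,
--     # except that a zero divider leaves the all-ones quotient and the
--     # dividend untouched (the hardware's natural no-check behaviour).
--     a = dividend % 256
--     b = divider % 256
--     if b == 0:
--         return (255, a)
--     return (a // b, a % b)
-- ===== Notes on version B (the rewrite author's own statement) =====
-- stated objective: simpler
-- what changed: Replaces the 8-iteration shift-subtract restoring-division loop with a direct divmod of the 8-bit-masked operands (zero divider yields the all-ones quotient and the dividend, as the unguarded hardware loop does).
import Mathlib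
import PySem

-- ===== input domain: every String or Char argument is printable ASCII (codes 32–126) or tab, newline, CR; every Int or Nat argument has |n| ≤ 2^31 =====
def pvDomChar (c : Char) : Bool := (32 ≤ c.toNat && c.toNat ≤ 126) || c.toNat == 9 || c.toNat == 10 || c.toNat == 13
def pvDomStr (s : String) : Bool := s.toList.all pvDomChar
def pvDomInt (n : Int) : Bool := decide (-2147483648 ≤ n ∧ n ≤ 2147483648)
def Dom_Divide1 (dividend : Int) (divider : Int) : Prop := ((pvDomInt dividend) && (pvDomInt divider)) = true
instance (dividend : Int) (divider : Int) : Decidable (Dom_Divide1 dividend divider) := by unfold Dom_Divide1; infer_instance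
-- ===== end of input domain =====

-- B replaces A's 8-step shift-subtract restoring-division loop with a direct divmod of the
-- 8-bit-masked operands (simpler; zero divider yields (255, dividend&255), as A's unguarded loop does).


-- ===== PORT A =====
-- A's while loop over i < 8, carrying (quotent, reminder); counts the remaining iterations.
-- On the values this loop handles the Python bit operations are exact integer arithmetic:
-- `x << 1` = x * 2; `quotent | 1` = quotent + 1 (quotent is even and nonnegative here, so
-- OR with 1 just sets the cleared low bit).
def divide1Loop (divider : Int) : Nat → Int → Int → Int × Int
  | 0, quotent, reminder => (quotent, reminder)
  | Nat.succ n, quotent, reminder =>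
    let quotent := quotent * 2
    let reminder := reminder * 2
    if reminder - divider ≥ 0 then
      divide1Loop divider n (quotent + 1) (reminder - divider)
    else
      divide1Loop divider n quotent reminder

def Divide1 (dividend : Int) (divider : Int) : Int × Int :=
  -- `x & 255` = x mod 256 (Python floor mod; exact for every int, incl. negatives);
  -- `divider << 8` = divider * 256; `reminder >> 8` = reminder // 256 (floor; exact).
  let dividend := PySem.Int.mod dividend 256
  let divider := PySem.Int.mod divider 256
  let divider := divider * 256
  let res := divide1Loop divider 8 0 dividend
  (res.1, PySem.Int.floordiv res.2 256)

-- ===== PORT B =====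
def Divide1_alt (dividend : Int) (divider : Int) : Int × Int :=
  let a := PySem.Int.mod dividend 256
  let b := PySem.Int.mod divider 256
  if b = 0 then (255, a)
  else (PySem.Int.floordiv a b, PySem.Int.mod a b)

-- ===== PRECONDITION & SPEC =====
def Spec_Divide1 (dividend : Int) (divider : Int) (out : Int × Int) : Prop := out = Divide1_alt dividend divider
instance (dividend : Int) (divider : Int) (out : Int × Int) : Decidable (Spec_Divide1 dividend divider out) := by unfold Spec_Divide1; infer_instance

-- ===== CLAIM (what is proved, stated in full; the proofs are below) =====
def Claim_equal_Divide1 : Prop := ∀ (dividend : Int) (divider : Int), Dom_Divide1 dividend divider → Spec_Divide1 dividend divider (Divide1 dividend divider)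

-- ===== LEMMAS AND PROOFS =====

-- Zero divider: every step doubles the remainder and appends a 1 bit to the quotient.
theorem divide1Loop_zero (i : Nat) (q r : Int) (hr : 0 ≤ r) :
    divide1Loop 0 i q r = (q * 2 ^ i + (2 ^ i - 1), r * 2 ^ i) := by
  induction i generalizing q r with
  | zero => simp [divide1Loop]
  | succ n ih =>
    have h : r * 2 - 0 ≥ 0 := by omega
    rw [divide1Loop, if_pos h]
    rw [ih (q * 2 + 1) (r * 2 - 0) (by omega)]
    rw [Prod.mk.injEq]
    exact ⟨by ring, by ring⟩

-- Restoring-division invariant: with divider D > 0 and 0 ≤ r < D, i steps compute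
-- the quotient and remainder of r * 2^i by D.
theorem divide1Loop_pos (D : Int) (hD : 0 < D) (i : Nat) (q r : Int)
    (h0 : 0 ≤ r) (h1 : r < D) :
    divide1Loop D i q r = (q * 2 ^ i + (r * 2 ^ i) / D, (r * 2 ^ i) % D) := by
  induction i generalizing q r with
  | zero =>
    simp [divide1Loop]
    rw [Int.ediv_eq_zero_of_lt h0 h1, Int.emod_eq_of_lt h0 h1]
    simp
  | succ n ih =>
    rw [divide1Loop]
    by_cases h : r * 2 - D ≥ 0
    · rw [if_pos h]
      rw [ih (q * 2 + 1) (r * 2 - D) (by omega) (by omega)]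
      have key : r * 2 ^ (n + 1) = (r * 2 - D) * 2 ^ n + 2 ^ n * D := by ring
      rw [key, Int.add_mul_ediv_right _ _ (by omega), Int.add_mul_emod_self_right]
      rw [Prod.mk.injEq]
      exact ⟨by ring, rfl⟩
    · rw [if_neg h]
      rw [ih (q * 2) (r * 2) (by omega) (by omega)]
      have key : r * 2 * 2 ^ n = r * 2 ^ (n + 1) := by ring
      rw [key, Prod.mk.injEq]
      exact ⟨by ring, rfl⟩

theorem Divide1_eq_alt (dividend divider : Int) : Divide1 dividend divider = Divide1_alt dividend divider := by
  unfold Divide1 Divide1_alt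
  have h256 : (0 : Int) < 256 := by norm_num
  simp only [PySem.Int.mod_eq_emod_of_pos h256]
  set a := dividend % 256 with ha
  set b := divider % 256 with hb
  have ha0 : 0 ≤ a := Int.emod_nonneg _ (by norm_num)
  have ha1 : a < 256 := Int.emod_lt_of_pos _ h256
  have hb0 : 0 ≤ b := Int.emod_nonneg _ (by norm_num)
  have hb1 : b < 256 := Int.emod_lt_of_pos _ h256
  by_cases hz : b = 0
  · rw [if_pos hz, hz, zero_mul]
    rw [divide1Loop_zero 8 0 a ha0]
    rw [Prod.mk.injEq]
    refine ⟨by norm_num, ?_⟩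
    rw [PySem.Int.floordiv_eq_ediv_of_pos h256]
    rw [show (2:Int) ^ 8 = 256 by norm_num, Int.mul_ediv_cancel _ (by norm_num : (256:Int) ≠ 0)]
  · rw [if_neg hz]
    have hD : (0 : Int) < b * 256 := by omega
    rw [divide1Loop_pos (b * 256) hD 8 0 a ha0 (by omega)]
    have hq : (a * 2 ^ 8) / (b * 256) = a / b := by
      have h1 : a * 2 ^ 8 = a * 256 := by norm_num
      rw [h1, Int.mul_ediv_mul_of_pos_left a b (by norm_num : (0:Int) < 256)]
    have hr : ((a * 2 ^ 8) % (b * 256)) = 256 * (a % b) := by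
      have h1 : a * 2 ^ 8 = 256 * a := by ring
      have h2 : b * 256 = 256 * b := by ring
      rw [h1, h2, Int.mul_emod_mul_of_pos a b (by norm_num : (0:Int) < 256)]
    simp only [zero_mul, zero_add]
    rw [hq, hr]
    rw [PySem.Int.floordiv_eq_ediv_of_pos h256]
    rw [mul_comm (256:Int) (a % b), Int.mul_ediv_cancel _ (by norm_num : (256:Int) ≠ 0)]
    rw [PySem.Int.floordiv_eq_ediv_of_pos (by omega : (0:Int) < b),
        PySem.Int.mod_eq_emod_of_pos (by omega : (0:Int) < b)]

-- ===== VERDICT (by name: the statement is the Claim_ definition above) =====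
theorem Divide1_spec : Claim_equal_Divide1 := by
  intro dividend divider _
  exact Divide1_eq_alt dividend divider
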